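-- pv_equiv track=rewrite | github.com/NimComPoo-04/goof | lzw.py | lzw_pack
-- ===== SOURCE A (Python) =====
-- def lzw_pack(codes, minsiz):
--     i = 0
--     packed = 0
--     for c in codes:
--         packed |= c << i
--
--         if c > (1 << minsiz):
--             minsiz += 1
--
--         i = i + minsiz
--
--     return packed
-- ===== SOURCE B (Python) =====
-- def lzw_pack(codes, minsiz):
--     # Pass 1: the bit-width assigned to each code (the running minsiz after each step).
--     m = minsiz
--     widths = []
--     for c in codes:
--         if c > (1 << m):
--             m += 1
--         widths.append(m)
--
--     # Pass 2: divide and conquer — OR-merge packed halves, so big-int work is balanced.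
--     def pack(lo, hi):
--         if hi - lo == 1:
--             return codes[lo], widths[lo]
--         mid = (lo + hi) // 2
--         lv, lw = pack(lo, mid)
--         rv, rw = pack(mid, hi)
--         return lv | (rv << lw), lw + rw
--
--     if not codes:
--         return 0
--     return pack(0, len(codes))[0]
-- ===== Notes on version B (the rewrite author's own statement) =====
-- stated objective: faster
-- what changed: B precomputes all per-code bit-widths in one pass and assembles the packed integer by divide-and-conquer OR-merging of balanced halves, instead of ORing each shifted code into one ever-growing accumulator.
import Mathlib
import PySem

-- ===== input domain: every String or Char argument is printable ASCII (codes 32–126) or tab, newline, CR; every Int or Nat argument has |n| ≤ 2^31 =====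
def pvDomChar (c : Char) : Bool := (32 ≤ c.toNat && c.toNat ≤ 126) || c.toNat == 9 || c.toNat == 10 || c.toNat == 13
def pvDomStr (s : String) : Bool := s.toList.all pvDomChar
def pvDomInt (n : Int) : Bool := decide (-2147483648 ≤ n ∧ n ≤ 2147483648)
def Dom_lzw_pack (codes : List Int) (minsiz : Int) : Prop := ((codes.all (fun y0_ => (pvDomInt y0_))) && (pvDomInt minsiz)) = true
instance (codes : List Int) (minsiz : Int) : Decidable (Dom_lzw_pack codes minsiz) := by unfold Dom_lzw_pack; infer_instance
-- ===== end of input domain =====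

-- B packs the codes by divide-and-conquer OR-merging of balanced halves after a
-- one-pass width computation, instead of A's single ever-growing OR accumulator.


-- ===== PORT A =====
-- state (i, packed, minsiz); shift counts ported with .toNat — exact under Pre_ (all counts ≥ 0 there)
def lzw_pack (codes : List Int) (minsiz : Int) : Int :=
  (codes.foldl
    (fun (s : Int × Int × Int) (c : Int) =>
      let packed := PySem.Int.bor s.2.1 (c <<< s.1.toNat)        -- packed |= c << i
      let m := if c > ((1 : Int) <<< s.2.2.toNat) then s.2.2 + 1 else s.2.2
      (s.1 + m, packed, m))
    (0, 0, minsiz)).2.1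

-- ===== PORT B =====
-- pack(lo, hi) of Source B; the 'hi ≤ lo' branch is a totality guard only (Source B never calls pack on an empty range);
-- codes[lo] / widths[lo] are in range whenever pack reaches the leaf, so getD is exact.
def pvPackDC (codes widths : List Int) (lo hi : Nat) : Int × Int :=
  if hi ≤ lo then (0, 0)
  else if hi - lo = 1 then (codes.getD lo 0, widths.getD lo 0)
  else
    let mid := (lo + hi) / 2
    let l := pvPackDC codes widths lo mid
    let r := pvPackDC codes widths mid hi
    (PySem.Int.bor l.1 (r.1 <<< l.2.toNat), l.2 + r.2)
  termination_by hi - lo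
  decreasing_by all_goals omega

def lzw_pack_alt (codes : List Int) (minsiz : Int) : Int :=
  let widths := (codes.foldl
    (fun (st : Int × List Int) (c : Int) =>
      let m := if c > ((1 : Int) <<< st.1.toNat) then st.1 + 1 else st.1
      (m, st.2 ++ [m]))
    (minsiz, [])).2
  if codes = [] then 0
  else (pvPackDC codes widths 0 codes.length).1

-- ===== PRECONDITION & SPEC =====
-- Pre_ excludes exactly the inputs on which the Python A raises: with codes nonempty and
-- minsiz < 0, A's first iteration evaluates '1 << minsiz' (or a later 'c << i' with i < 0)
-- and raises ValueError (negative shift count); B raises there as well.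
def Pre_lzw_pack (codes : List Int) (minsiz : Int) : Prop := codes = [] ∨ 0 ≤ minsiz
instance (codes : List Int) (minsiz : Int) : Decidable (Pre_lzw_pack codes minsiz) := by unfold Pre_lzw_pack; infer_instance
def pvWitness_lzw_pack : List Int × Int := ([9, 200, 3, 17], 4)

def Spec_lzw_pack (codes : List Int) (minsiz : Int) (out : Int) : Prop := out = lzw_pack_alt codes minsiz
instance (codes : List Int) (minsiz : Int) (out : Int) : Decidable (Spec_lzw_pack codes minsiz out) := by unfold Spec_lzw_pack; infer_instance

-- ===== CLAIM (what is proved, stated in full; the proofs are below) =====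
def Claim_equal_lzw_pack : Prop := ∀ (codes : List Int) (minsiz : Int), Dom_lzw_pack codes minsiz → Pre_lzw_pack codes minsiz → Spec_lzw_pack codes minsiz (lzw_pack codes minsiz)

-- ===== LEMMAS AND PROOFS =====

-- ---- bit-level foundation ----

theorem pvAddOfAndEqZero (a : Nat) : ∀ b : Nat, a &&& b = 0 → a + b = a ||| b := by
  induction a using Nat.binaryRec with
  | zero => intro b _; simp
  | bit p a' ih =>
    intro b hb
    induction b using Nat.bitCasesOn with
    | bit q b' =>
      rw [Nat.land_bit, Nat.bit_val] at hb
      have hpq : (p && q) = false := by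
        rcases h' : (p && q) with _ | _
        · rfl
        · rw [h'] at hb; simp only [Bool.toNat_true] at hb; omega
      have hab : a' &&& b' = 0 := by
        rw [hpq] at hb; simp only [Bool.toNat_false] at hb; omega
      rw [Nat.lor_bit, Nat.bit_val, Nat.bit_val, Nat.bit_val, ← ih b' hab]
      have hpq2 : p.toNat + q.toNat = (p || q).toNat := by
        rcases p <;> rcases q <;> simp_all
      omega

theorem pvSubAndEqLdiff (x m : Nat) : x - (x &&& m) = x.ldiff m := by
  have h1 : (x &&& m) &&& x.ldiff m = 0 := by
    apply Nat.eq_of_testBit_eq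
    intro k
    simp only [Nat.testBit_land, Nat.testBit_ldiff, Nat.zero_testBit]
    rcases x.testBit k <;> rcases m.testBit k <;> rfl
  have h2 : (x &&& m) ||| x.ldiff m = x := by
    apply Nat.eq_of_testBit_eq
    intro k
    simp only [Nat.testBit_lor, Nat.testBit_land, Nat.testBit_ldiff]
    rcases x.testBit k <;> rcases m.testBit k <;> rfl
  have h3 := pvAddOfAndEqZero (x &&& m) (x.ldiff m) h1
  have h4 : x &&& m ≤ x := Nat.and_le_left
  omega

theorem pvIntExt (a b : Int) (h : ∀ k, a.testBit k = b.testBit k) : a = b := by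
  have hf : ∀ (m n : Nat), (∀ k, (Int.ofNat m).testBit k = (Int.negSucc n).testBit k) → False := by
    intro m n hmn
    have h1 : m.testBit (m + n) = false := Nat.testBit_lt_two_pow (by
      calc m < 2 ^ m := Nat.lt_two_pow_self
        _ ≤ 2 ^ (m + n) := Nat.pow_le_pow_right (by norm_num) (by omega))
    have h2 : n.testBit (m + n) = false := Nat.testBit_lt_two_pow (by
      calc n < 2 ^ n := Nat.lt_two_pow_self
        _ ≤ 2 ^ (m + n) := Nat.pow_le_pow_right (by norm_num) (by omega))
    have := hmn (m + n)
    simp only [Int.testBit, h1, h2] at this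
    exact absurd this (by simp)
  cases a with
  | ofNat m =>
    cases b with
    | ofNat n =>
      have : m = n := Nat.eq_of_testBit_eq (fun k => h k)
      simp [this]
    | negSucc n => exact absurd (hf m n h) (by simp_all)
  | negSucc m =>
    cases b with
    | ofNat n => exact absurd (hf n m (fun k => (h k).symm)) (by simp_all)
    | negSucc n =>
      have : m = n := Nat.eq_of_testBit_eq (fun k => by
        have := h k
        simp only [Int.testBit] at this
        exact Bool.not_inj this)
      simp [this]

theorem pvNegSuccEq (y : Nat) : -(y : Int) - 1 = Int.negSucc y := by
  rw [Int.negSucc_eq]; ring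

theorem pvTestBitOfNat (n : Nat) (k : Nat) : ((n : Int)).testBit k = n.testBit k := rfl

theorem pvTestBitNegSucc (n : Nat) (k : Nat) : (Int.negSucc n).testBit k = !n.testBit k := rfl

theorem pvTestBitNonneg (a : Int) (h : 0 ≤ a) (k : Nat) : a.testBit k = a.toNat.testBit k := by
  cases a with
  | ofNat n => rfl
  | negSucc n => exact absurd h (by simp)

theorem pvTestBitNeg (a : Int) (h : a < 0) (k : Nat) :
    a.testBit k = !((-a - 1).toNat.testBit k) := by
  cases a with
  | ofNat n => exact absurd h (by exact (Int.natCast_nonneg n).not_gt)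
  | negSucc n =>
    have : (-(Int.negSucc n) - 1).toNat = n := by rw [Int.negSucc_eq]; omega
    rw [this, pvTestBitNegSucc]

theorem pvTestBitBor (a b : Int) (k : Nat) :
    (PySem.Int.bor a b).testBit k = (a.testBit k || b.testBit k) := by
  unfold PySem.Int.bor
  by_cases ha : 0 ≤ a <;> by_cases hb : 0 ≤ b <;>
    simp only [ha, hb, if_pos, if_false]
  · -- both nonneg
    rw [pvTestBitNonneg a ha k, pvTestBitNonneg b hb k, pvTestBitOfNat, Nat.testBit_lor]
  · -- a ≥ 0, b < 0
    rw [pvSubAndEqLdiff, pvNegSuccEq, pvTestBitNegSucc, Nat.testBit_ldiff,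
      pvTestBitNonneg a ha k, pvTestBitNeg b (by omega) k]
    rcases ((-b - 1).toNat.testBit k) <;> rcases (a.toNat.testBit k) <;> rfl
  · -- a < 0, b ≥ 0
    rw [pvSubAndEqLdiff, pvNegSuccEq, pvTestBitNegSucc, Nat.testBit_ldiff,
      pvTestBitNonneg b hb k, pvTestBitNeg a (by omega) k]
    rcases ((-a - 1).toNat.testBit k) <;> rcases (b.toNat.testBit k) <;> rfl
  · -- both negative
    rw [pvNegSuccEq, pvTestBitNegSucc, Nat.testBit_land,
      pvTestBitNeg a (by omega) k, pvTestBitNeg b (by omega) k]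
    rcases ((-a - 1).toNat.testBit k) <;> rcases ((-b - 1).toNat.testBit k) <;> rfl

theorem pvTestBitShl (a : Int) (s k : Nat) :
    (a <<< s).testBit k = (decide (s ≤ k) && a.testBit (k - s)) := by
  cases a with
  | ofNat n =>
    show ((Int.ofNat (n <<< s)).testBit k) = _
    simp only [Int.testBit, Nat.testBit_shiftLeft, ge_iff_le]
  | negSucc n =>
    show ((Int.negSucc ((n + 1) <<< s - 1)).testBit k) = _
    have key : ((n + 1) <<< s - 1).testBit k = (decide (k < s) || n.testBit (k - s)) := by
      have hz : n <<< s &&& (2 ^ s - 1) = 0 := by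
        apply Nat.eq_of_testBit_eq
        intro j
        simp only [Nat.testBit_land, Nat.testBit_shiftLeft, Nat.testBit_two_pow_sub_one,
          Nat.zero_testBit, ge_iff_le]
        by_cases hj : s ≤ j
        · have h' : ¬ (j < s) := by omega
          simp [h']
        · simp [hj]
      have hsum : (n + 1) <<< s - 1 = n <<< s + (2 ^ s - 1) := by
        have h1 : (n + 1) <<< s = (n + 1) * 2 ^ s := Nat.shiftLeft_eq _ _
        have h2 : n <<< s = n * 2 ^ s := Nat.shiftLeft_eq _ _
        have h3 : 0 < 2 ^ s := Nat.two_pow_pos s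
        rw [h1, h2, Nat.add_mul, Nat.one_mul]; omega
      rw [hsum, pvAddOfAndEqZero _ _ hz, Nat.testBit_lor, Nat.testBit_shiftLeft,
        Nat.testBit_two_pow_sub_one]
      by_cases hk : s ≤ k
      · have h' : ¬ (k < s) := by omega
        simp [hk, h']
      · have h' : k < s := by omega
        simp [hk, h']
    simp only [Int.testBit, key]
    by_cases hk : s ≤ k
    · have h' : ¬ (k < s) := by omega
      simp [hk, h']
    · have h' : k < s := by omega
      simp [hk, h']

theorem pvBorAssoc (a b c : Int) :
    PySem.Int.bor (PySem.Int.bor a b) c = PySem.Int.bor a (PySem.Int.bor b c) := by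
  apply pvIntExt
  intro k
  simp only [pvTestBitBor, Bool.or_assoc]

theorem pvZeroBor (a : Int) : PySem.Int.bor 0 a = a := by
  apply pvIntExt
  intro k
  simp only [pvTestBitBor]
  have : (0 : Int).testBit k = false := by simp [Int.testBit, Nat.zero_testBit]
  simp [this]

theorem pvShlBor (a b : Int) (s : Nat) :
    (PySem.Int.bor a b) <<< s = PySem.Int.bor (a <<< s) (b <<< s) := by
  apply pvIntExt
  intro k
  simp only [pvTestBitShl, pvTestBitBor]
  by_cases h : s ≤ k <;> simp [h]

theorem pvShlShl (a : Int) (s t : Nat) : (a <<< s) <<< t = a <<< (s + t) := by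
  simp only [Int.shiftLeft_eq, pow_add]
  ring

theorem pvShlZero (a : Int) : a <<< (0 : Nat) = a := by
  simp [Int.shiftLeft_eq]

-- ---- width list characterisation ----

def pvWidths : List Int → Int → List Int
  | [], _ => []
  | c :: cs, m =>
      let m' := if c > ((1 : Int) <<< m.toNat) then m + 1 else m
      m' :: pvWidths cs m'

theorem pvWidthsLength (cs : List Int) : ∀ m, (pvWidths cs m).length = cs.length := by
  induction cs with
  | nil => intro m; rfl
  | cons c cs ih => intro m; simp [pvWidths, ih]

theorem pvWidthsNonneg (cs : List Int) : ∀ m, 0 ≤ m → ∀ w ∈ pvWidths cs m, 0 ≤ w := by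
  induction cs with
  | nil => intro m _ w hw; simp [pvWidths] at hw
  | cons c cs ih =>
    intro m hm w hw
    simp only [pvWidths, List.mem_cons] at hw
    rcases hw with hw | hw
    · subst hw; split <;> omega
    · exact ih _ (by split <;> omega) w hw

theorem pvFoldWidths (cs : List Int) : ∀ (m : Int) (acc : List Int),
    (cs.foldl (fun (st : Int × List Int) (c : Int) =>
      let m' := if c > ((1 : Int) <<< st.1.toNat) then st.1 + 1 else st.1
      (m', st.2 ++ [m'])) (m, acc)).2 = acc ++ pvWidths cs m := by
  induction cs with
  | nil => intro m acc; simp [pvWidths]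
  | cons c cs ih =>
    intro m acc
    simp only [List.foldl_cons, pvWidths]
    rw [ih]
    simp

-- ---- the shifted-OR combiner ----

def pvOrPack : List Int → List Int → Int
  | [], _ => 0
  | _ :: _, [] => 0
  | c :: cs, w :: ws => PySem.Int.bor c (pvOrPack cs ws <<< w.toNat)

-- A's fold computes pvOrPack of the remaining codes, shifted by the current offset.
theorem pvFoldA (cs : List Int) : ∀ (i p m : Int), 0 ≤ i → 0 ≤ m →
    (cs.foldl (fun (s : Int × Int × Int) (c : Int) =>
      let packed := PySem.Int.bor s.2.1 (c <<< s.1.toNat)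
      let m' := if c > ((1 : Int) <<< s.2.2.toNat) then s.2.2 + 1 else s.2.2
      (s.1 + m', packed, m')) (i, p, m)).2.1
    = PySem.Int.bor p ((pvOrPack cs (pvWidths cs m)) <<< i.toNat) := by
  induction cs with
  | nil =>
    intro i p m _ _
    simp [pvOrPack]
  | cons c cs ih =>
    intro i p m hi hm
    simp only [List.foldl_cons, pvWidths, pvOrPack]
    set m' : Int := if c > ((1 : Int) <<< m.toNat) then m + 1 else m with hm'
    have hm'0 : 0 ≤ m' := by rw [hm']; split <;> omega
    rw [ih (i + m') (PySem.Int.bor p (c <<< i.toNat)) m' (by omega) hm'0]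
    rw [pvShlBor, pvShlShl, pvBorAssoc]
    have hn : (i + m').toNat = m'.toNat + i.toNat := by omega
    rw [hn]

-- pvOrPack splits along an append (matching width prefix, all widths ≥ 0).
theorem pvOrPackAppend (xs1 : List Int) : ∀ (ws1 xs2 ws2 : List Int),
    xs1.length = ws1.length → (∀ w ∈ ws1, 0 ≤ w) →
    pvOrPack (xs1 ++ xs2) (ws1 ++ ws2)
      = PySem.Int.bor (pvOrPack xs1 ws1) ((pvOrPack xs2 ws2) <<< (ws1.sum).toNat) := by
  induction xs1 with
  | nil =>
    intro ws1 xs2 ws2 hlen _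
    have : ws1 = [] := by cases ws1 <;> simp_all
    subst this
    simp [pvOrPack, pvZeroBor]
  | cons x xs ih =>
    intro ws1 xs2 ws2 hlen hnn
    cases ws1 with
    | nil => simp at hlen
    | cons w ws =>
      simp only [List.cons_append, pvOrPack]
      rw [ih ws xs2 ws2 (by simpa using hlen) (fun v hv => hnn v (by simp [hv]))]
      rw [pvBorAssoc, pvShlBor, pvShlShl]
      congr 3
      have hw : 0 ≤ w := hnn w (by simp)
      have hws : 0 ≤ ws.sum := List.sum_nonneg (fun v hv => hnn v (by simp [hv]))
      simp only [List.sum_cons]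
      omega

theorem pvOrPackSingle (c w : Int) : pvOrPack [c] [w] = c := by
  simp [pvOrPack]

-- segment of a list
theorem pvSegSplit {α : Type} (l : List α) (lo mid hi : Nat) (h1 : lo ≤ mid) (h2 : mid ≤ hi) :
    (l.drop lo).take (hi - lo) = (l.drop lo).take (mid - lo) ++ (l.drop mid).take (hi - mid) := by
  rw [show hi - lo = (mid - lo) + (hi - mid) by omega, List.take_add]
  congr 1
  rw [List.drop_drop, show lo + (mid - lo) = mid by omega]

theorem pvSegLen {α : Type} (l : List α) (lo hi : Nat) (hhi : hi ≤ l.length) :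
    ((l.drop lo).take (hi - lo)).length = hi - lo := by
  simp [List.length_take, List.length_drop]
  omega

theorem pvSegOne {α : Type} [Inhabited α] (l : List α) (lo : Nat) (h : lo < l.length) :
    (l.drop lo).take 1 = [l.getD lo default] := by
  rw [List.take_one, List.head?_drop, List.getElem?_eq_getElem h]
  simp [List.getD_eq_getElem?_getD, List.getElem?_eq_getElem h]

-- the divide-and-conquer pack equals pvOrPack on the segment, and returns the width sum
theorem pvPackDCEq (codes ws : List Int) (hlen : ws.length = codes.length)
    (hnn : ∀ w ∈ ws, 0 ≤ w) :
    ∀ (n lo hi : Nat), hi - lo ≤ n → lo < hi → hi ≤ codes.length →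
    pvPackDC codes ws lo hi
      = (pvOrPack ((codes.drop lo).take (hi - lo)) ((ws.drop lo).take (hi - lo)),
         ((ws.drop lo).take (hi - lo)).sum) := by
  intro n
  induction n with
  | zero => intro lo hi h1 h2 _; omega
  | succ n IH =>
    intro lo hi hb hlt hle
    rw [pvPackDC]
    by_cases hbase : hi - lo = 1
    · have hlo : lo < codes.length := by omega
      have hlo' : lo < ws.length := by omega
      rw [if_neg (by omega), if_pos hbase, hbase]
      rw [pvSegOne codes lo hlo, pvSegOne ws lo hlo', pvOrPackSingle]
      simp
    · rw [if_neg (by omega), if_neg hbase]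
      simp only []
      set mid := (lo + hi) / 2 with hmid
      have hmid1 : lo < mid := by omega
      have hmid2 : mid < hi := by omega
      rw [IH lo mid (by omega) hmid1 (by omega), IH mid hi (by omega) hmid2 hle]
      have hsplitC := pvSegSplit codes lo mid hi (by omega) (by omega)
      have hsplitW := pvSegSplit ws lo mid hi (by omega) (by omega)
      have hlen1 : ((codes.drop lo).take (mid - lo)).length = ((ws.drop lo).take (mid - lo)).length := by
        rw [pvSegLen codes lo mid (by omega), pvSegLen ws lo mid (by omega)]
      have hnn1 : ∀ w ∈ (ws.drop lo).take (mid - lo), 0 ≤ w := by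
        intro w hw
        exact hnn w (List.mem_of_mem_drop (List.mem_of_mem_take hw))
      rw [hsplitC, hsplitW, pvOrPackAppend _ _ _ _ hlen1 hnn1, List.sum_append]

-- ===== VERDICT (by name: the statement is the Claim_ definition above) =====
theorem lzw_pack_spec : Claim_equal_lzw_pack := by
  intro codes minsiz _ hpre
  unfold Spec_lzw_pack lzw_pack lzw_pack_alt
  rcases hpre with hnil | hm
  · subst hnil; simp
  · rw [pvFoldWidths codes minsiz []]
    simp only [List.nil_append]
    by_cases hn : codes = []
    · subst hn; simp
    · rw [if_neg hn]
      rw [pvFoldA codes 0 0 minsiz le_rfl hm, pvZeroBor]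
      have h0 : (0 : Int).toNat = 0 := rfl
      rw [h0, pvShlZero]
      have hlen : (pvWidths codes minsiz).length = codes.length := pvWidthsLength codes minsiz
      have hnn := pvWidthsNonneg codes minsiz hm
      have hlt : 0 < codes.length := List.length_pos_iff.mpr hn
      rw [pvPackDCEq codes _ hlen hnn codes.length 0 codes.length (by omega) hlt le_rfl]
      simp only [Nat.sub_zero, List.drop_zero]
      rw [List.take_length, List.take_of_length_le (le_of_eq hlen)]
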